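-- pv_equiv track=rewrite | github.com/disenoalgoritmos/juego-lab-g3 | codigo_moha/Variables_Globales.py | casillaEnemigaSucesores
-- ===== SOURCE A (Python) =====
-- def comprobarMolino(gamers,turn,pos):
--         HayMolino = False
--         if int(pos)%2==0:
--             if comprobarPar(int(pos),gamers[turn]):
--                 HayMolino = True
--         else:
--             if comprobarImpar(int(pos),gamers[turn]):
--                 HayMolino = True
--         return HayMolino
--
-- def comprobarPar(pos,fichas):
--         HayMolino = False
--         if(((pos+2)%8+8*(pos//8) in fichas and (pos+1)%8+8*(pos//8)in fichas)  or ((pos-2)%8+8*(pos//8) in fichas and (pos-1)%8+8*(pos//8) in fichas)):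
--             HayMolino = True
--         return HayMolino
--
-- def comprobarImpar(pos,fichas):
--         unidad=pos//8
--         HayMolino = False
--         if(((pos+1)%8+8*(pos//8) in fichas and (pos-1)%8+8*(pos//8)in fichas)):
--             HayMolino = True
--         elif(unidad == 0 and (pos+8 in fichas and pos +16 in fichas)):
--             HayMolino = True
--         elif(unidad == 1 and (pos+8 in fichas and pos -8 in fichas)):
--             HayMolino = True
--         elif(unidad == 2 and (pos-8 in fichas and pos -16 in fichas)):
--             HayMolino = True
--         return HayMolino
--
-- def casillaEnemigaSucesores(gamers,turn,fase): #No se pueden eliminar las fichas enemigas en un molino, editar eso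
--         posiciones=[]
--         posicionesM=[]
--         for ficha_eliminada in gamers[(turn-1)%2]:
--             mol=comprobarMolino(gamers, (turn-1)%2,int(ficha_eliminada))
--             if not mol:
--                 posiciones.append(ficha_eliminada)
--             elif fase==2:
--                 posicionesM.append(ficha_eliminada)
--         if len(posicionesM)==len(gamers[(turn-1)%2]) and len(posicionesM)<=6:
--             posiciones=posicionesM.copy()
--
--         return posiciones
-- ===== SOURCE B (Python) =====
-- def casillaEnemigaSucesores(gamers, turn, fase):
--     enemy = gamers[(turn - 1) % 2]
--     owned = set(enemy)
--     # Mill lines of the board: the 4 spokes joining the three rings on odd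
--     # positions, plus the 4 edge lines of every ring that holds a piece
--     # (ring r covers positions 8r..8r+7; A's floor-div/mod arithmetic is
--     # exactly ring-local, so rings generalize to any integer r).
--     lines = [(q, q + 8, q + 16) for q in (1, 3, 5, 7)]
--     for r in {p // 8 for p in enemy}:
--         b = 8 * r
--         lines.extend([(b, b + 1, b + 2), (b + 2, b + 3, b + 4),
--                       (b + 4, b + 5, b + 6), (b + 6, b + 7, b)])
--     # A position is protected iff it lies on a fully-owned line.
--     milled = set()
--     for line in lines:
--         if all(x in owned for x in line):
--             milled.update(line)
--     posiciones = [p for p in enemy if p not in milled]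
--     posicionesM = [p for p in enemy if p in milled] if fase == 2 else []
--     if len(posicionesM) == len(enemy) and len(posicionesM) <= 6:
--         posiciones = posicionesM
--     return posiciones
-- ===== Notes on version B (the rewrite author's own statement) =====
-- stated objective: alternative
-- what changed: Replaces A's per-piece modular neighbor predicates (comprobarMolino/Par/Impar) by a geometric mill-line table: B enumerates the board's mill lines once (the 4 ring-edge triples of each occupied ring plus the 4 fixed spoke triples), collects the positions of fully-owned lines into a 'milled' set, and partitions the enemy pieces by membership in that set.
import Mathlib
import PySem

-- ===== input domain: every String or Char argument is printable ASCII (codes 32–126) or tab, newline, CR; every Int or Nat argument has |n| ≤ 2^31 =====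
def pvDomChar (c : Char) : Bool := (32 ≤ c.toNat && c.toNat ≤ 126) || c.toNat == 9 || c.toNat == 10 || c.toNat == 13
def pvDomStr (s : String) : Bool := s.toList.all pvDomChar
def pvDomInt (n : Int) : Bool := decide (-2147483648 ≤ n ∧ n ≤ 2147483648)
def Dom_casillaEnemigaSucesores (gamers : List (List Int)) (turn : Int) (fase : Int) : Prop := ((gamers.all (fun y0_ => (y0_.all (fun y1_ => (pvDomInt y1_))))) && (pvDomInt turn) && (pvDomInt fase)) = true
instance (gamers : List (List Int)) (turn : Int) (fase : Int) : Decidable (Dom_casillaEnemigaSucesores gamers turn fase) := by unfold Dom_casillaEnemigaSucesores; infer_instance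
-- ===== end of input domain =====

-- B replaces A's per-piece modular neighbor predicates by a geometric mill-line
-- table: enumerate the mill lines once (ring-edge triples of each occupied ring
-- plus the 4 spoke triples), collect positions of fully-owned lines into a
-- 'milled' set, and partition the enemy pieces by membership; objective: alternative.

-- ===== PORT A =====
def comprobarPar (pos : Int) (fichas : List Int) : Bool :=
  let HayMolino := false
  if ((fichas.contains (PySem.Int.mod (pos + 2) 8 + 8 * PySem.Int.floordiv pos 8) &&
       fichas.contains (PySem.Int.mod (pos + 1) 8 + 8 * PySem.Int.floordiv pos 8)) ||
      (fichas.contains (PySem.Int.mod (pos - 2) 8 + 8 * PySem.Int.floordiv pos 8) &&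
       fichas.contains (PySem.Int.mod (pos - 1) 8 + 8 * PySem.Int.floordiv pos 8))) then
    true
  else HayMolino

def comprobarImpar (pos : Int) (fichas : List Int) : Bool :=
  let unidad := PySem.Int.floordiv pos 8
  let HayMolino := false
  if (fichas.contains (PySem.Int.mod (pos + 1) 8 + 8 * PySem.Int.floordiv pos 8) &&
      fichas.contains (PySem.Int.mod (pos - 1) 8 + 8 * PySem.Int.floordiv pos 8)) then
    true
  else if (unidad == 0 && (fichas.contains (pos + 8) && fichas.contains (pos + 16))) then
    true
  else if (unidad == 1 && (fichas.contains (pos + 8) && fichas.contains (pos - 8))) then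
    true
  else if (unidad == 2 && (fichas.contains (pos - 8) && fichas.contains (pos - 16))) then
    true
  else HayMolino

-- gamers[turn]: Python raises IndexError when out of range; never reached under Pre_
def comprobarMolino (gamers : List (List Int)) (turn : Int) (pos : Int) : Bool :=
  match PySem.List.pyGet? gamers turn with
  | none => false
  | some fichas =>
    let HayMolino := false
    if PySem.Int.mod pos 2 == 0 then
      if comprobarPar pos fichas then true else HayMolino
    else
      if comprobarImpar pos fichas then true else HayMolino

def casillaEnemigaSucesores (gamers : List (List Int)) (turn : Int) (fase : Int) : List Int :=
  match PySem.List.pyGet? gamers (PySem.Int.mod (turn - 1) 2) with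
  | none => []  -- Python raises IndexError; excluded by Pre_
  | some enemy =>
    let st := enemy.foldl (fun (acc : List Int × List Int) ficha =>
      let mol := comprobarMolino gamers (PySem.Int.mod (turn - 1) 2) ficha
      if !mol then (acc.1 ++ [ficha], acc.2)
      else if fase == 2 then (acc.1, acc.2 ++ [ficha])
      else acc) ([], [])
    if st.2.length == enemy.length && st.2.length ≤ 6 then st.2 else st.1

-- ===== PORT B =====
-- the 4 spoke mills joining the three rings on odd positions
def spokeLines : List (Int × Int × Int) := [(1, 9, 17), (3, 11, 19), (5, 13, 21), (7, 15, 23)]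

-- the 4 edge mills of ring r (positions 8r..8r+7)
def ringLinesOf (r : Int) : List (Int × Int × Int) :=
  [(8*r, 8*r+1, 8*r+2), (8*r+2, 8*r+3, 8*r+4), (8*r+4, 8*r+5, 8*r+6), (8*r+6, 8*r+7, 8*r)]

def fullLine (owned : PySem.Set Int) (l : Int × Int × Int) : Bool :=
  PySem.Set.contains owned l.1 && PySem.Set.contains owned l.2.1 && PySem.Set.contains owned l.2.2

def millLines (enemy : List Int) : List (Int × Int × Int) :=
  spokeLines ++
    (PySem.Set.ofList (enemy.map (fun q => PySem.Int.floordiv q 8))).flatMap ringLinesOf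

-- milled.update(line) for every fully-owned line
def milledOf (enemy : List Int) : PySem.Set Int :=
  (millLines enemy).foldl
    (fun m l => if fullLine (PySem.Set.ofList enemy) l then
        PySem.Set.add (PySem.Set.add (PySem.Set.add m l.1) l.2.1) l.2.2
      else m)
    PySem.Set.empty

def casillaEnemigaSucesores_alt (gamers : List (List Int)) (turn : Int) (fase : Int) : List Int :=
  match PySem.List.pyGet? gamers (PySem.Int.mod (turn - 1) 2) with
  | none => []  -- Python raises IndexError; excluded by Pre_
  | some enemy =>
    let milled := milledOf enemy
    let posiciones := enemy.filter (fun q => !(PySem.Set.contains milled q))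
    let posicionesM := if fase == 2 then enemy.filter (fun q => PySem.Set.contains milled q) else []
    if posicionesM.length == enemy.length && posicionesM.length ≤ 6 then posicionesM
    else posiciones

-- ===== PRECONDITION & SPEC =====
-- Pre_ excludes exactly the inputs where gamers[(turn-1)%2] raises IndexError in A.
def Pre_casillaEnemigaSucesores (gamers : List (List Int)) (turn : Int) (fase : Int) : Prop :=
  PySem.Raise.InRange gamers.length (PySem.Int.mod (turn - 1) 2)
instance (gamers : List (List Int)) (turn : Int) (fase : Int) : Decidable (Pre_casillaEnemigaSucesores gamers turn fase) := by unfold Pre_casillaEnemigaSucesores; infer_instance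

def pvWitness_casillaEnemigaSucesores : List (List Int) × Int × Int := ([[0, 1, 2], [5, 6, 7]], 1, 2)

def Spec_casillaEnemigaSucesores (gamers : List (List Int)) (turn : Int) (fase : Int) (out : List Int) : Prop := out = casillaEnemigaSucesores_alt gamers turn fase
instance (gamers : List (List Int)) (turn : Int) (fase : Int) (out : List Int) : Decidable (Spec_casillaEnemigaSucesores gamers turn fase out) := by unfold Spec_casillaEnemigaSucesores; infer_instance

-- ===== CLAIM (what is proved, stated in full; the proofs are below) =====
def Claim_equal_casillaEnemigaSucesores : Prop := ∀ (gamers : List (List Int)) (turn : Int) (fase : Int), Dom_casillaEnemigaSucesores gamers turn fase → Pre_casillaEnemigaSucesores gamers turn fase → Spec_casillaEnemigaSucesores gamers turn fase (casillaEnemigaSucesores gamers turn fase)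

-- ===== LEMMAS AND PROOFS =====

theorem mem_milled_foldl (owned : PySem.Set Int) (lines : List (Int × Int × Int)) (m : PySem.Set Int) (x : Int) :
    (x ∈ lines.foldl (fun m l => if fullLine owned l then
        PySem.Set.add (PySem.Set.add (PySem.Set.add m l.1) l.2.1) l.2.2 else m) m)
    ↔ x ∈ m ∨ ∃ l ∈ lines, fullLine owned l = true ∧ (x = l.1 ∨ x = l.2.1 ∨ x = l.2.2) := by
  induction lines generalizing m with
  | nil => simp
  | cons a as ih =>
    by_cases hA : fullLine owned a = true
    · simp only [List.foldl_cons, if_pos hA, ih, PySem.Set.mem_add, List.mem_cons]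
      constructor
      · rintro ((((hm|h)|h)|h)|⟨l,hl,hf,hx⟩)
        · exact Or.inl hm
        · exact Or.inr ⟨a, Or.inl rfl, hA, Or.inl h⟩
        · exact Or.inr ⟨a, Or.inl rfl, hA, Or.inr (Or.inl h)⟩
        · exact Or.inr ⟨a, Or.inl rfl, hA, Or.inr (Or.inr h)⟩
        · exact Or.inr ⟨l, Or.inr hl, hf, hx⟩
      · rintro (hm|⟨l,(rfl|hl),hf,hx⟩)
        · exact Or.inl (Or.inl (Or.inl (Or.inl hm)))
        · rcases hx with h|h|h <;> tauto
        · exact Or.inr ⟨l, hl, hf, hx⟩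
    · simp only [List.foldl_cons, if_neg hA, ih, List.mem_cons]
      constructor
      · rintro (hm|⟨l,hl,hf,hx⟩)
        · exact Or.inl hm
        · exact Or.inr ⟨l, Or.inr hl, hf, hx⟩
      · rintro (hm|⟨l,(rfl|hl),hf,hx⟩)
        · exact Or.inl hm
        · exact absurd hf hA
        · exact Or.inr ⟨l, hl, hf, hx⟩

theorem ring_line_owner (r p : Int) (l : Int × Int × Int) (hl : l ∈ ringLinesOf r)
    (hx : p = l.1 ∨ p = l.2.1 ∨ p = l.2.2) : r = PySem.Int.floordiv p 8 := by
  rw [PySem.Int.floordiv_eq_ediv_of_pos (by norm_num : (0:Int) < 8)]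
  fin_cases hl <;> rcases hx with rfl|rfl|rfl <;> simp <;> omega

theorem milled_char (enemy : List Int) (p : Int) (hp : p ∈ enemy) :
    p ∈ milledOf enemy ↔
      ((∃ l ∈ ringLinesOf (PySem.Int.floordiv p 8),
          fullLine (PySem.Set.ofList enemy) l = true ∧ (p = l.1 ∨ p = l.2.1 ∨ p = l.2.2)) ∨
       (∃ l ∈ spokeLines,
          fullLine (PySem.Set.ofList enemy) l = true ∧ (p = l.1 ∨ p = l.2.1 ∨ p = l.2.2))) := by
  unfold milledOf millLines
  rw [mem_milled_foldl]
  simp only [PySem.Set.mem_ofList, List.mem_append, List.mem_flatMap, List.mem_map]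
  constructor
  · rintro (hm|⟨l, (hs|⟨r, hr, hl⟩), hf, hx⟩)
    · simp [PySem.Set.empty] at hm
    · exact Or.inr ⟨l, hs, hf, hx⟩
    · exact Or.inl ⟨l, by rw [ring_line_owner r p l hl hx] at hl; exact hl, hf, hx⟩
  · rintro (⟨l, hl, hf, hx⟩|⟨l, hs, hf, hx⟩)
    · exact Or.inr ⟨l, Or.inr ⟨PySem.Int.floordiv p 8, ⟨p, hp, rfl⟩, hl⟩, hf, hx⟩
    · exact Or.inr ⟨l, Or.inl hs, hf, hx⟩

theorem spoke_char (enemy : List Int) (p : Int) (hp : p ∈ enemy)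
    (hodd : ¬ PySem.Int.mod p 2 = 0) :
    (∃ l ∈ spokeLines, fullLine (PySem.Set.ofList enemy) l = true ∧ (p = l.1 ∨ p = l.2.1 ∨ p = l.2.2)) ↔
      ((PySem.Int.floordiv p 8 = 0 ∧ p + 8 ∈ enemy ∧ p + 16 ∈ enemy) ∨
       (PySem.Int.floordiv p 8 = 1 ∧ p + 8 ∈ enemy ∧ p - 8 ∈ enemy) ∨
       (PySem.Int.floordiv p 8 = 2 ∧ p - 8 ∈ enemy ∧ p - 16 ∈ enemy)) := by
  rw [PySem.Int.mod_eq_emod_of_pos (by norm_num : (0:Int) < 2)] at hodd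
  rw [PySem.Int.floordiv_eq_ediv_of_pos (by norm_num : (0:Int) < 8)]
  simp only [spokeLines, List.mem_cons, List.not_mem_nil, or_false, fullLine,
    PySem.Set.contains_iff, PySem.Set.mem_ofList, Bool.and_eq_true]
  constructor
  · rintro ⟨l, (rfl|rfl|rfl|rfl), ⟨⟨h1, h2⟩, h3⟩, (rfl|rfl|rfl)⟩ <;> simp_all
  · rintro (⟨hu, h8, h16⟩|⟨hu, hp8, hm8⟩|⟨hu, hm8, hm16⟩)
    · have : p = 1 ∨ p = 3 ∨ p = 5 ∨ p = 7 := by omega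
      rcases this with rfl|rfl|rfl|rfl
      · exact ⟨(1,9,17), by simp, ⟨⟨by simpa using hp, by simpa using h8⟩, by simpa using h16⟩, by simp⟩
      · exact ⟨(3,11,19), by simp, ⟨⟨by simpa using hp, by simpa using h8⟩, by simpa using h16⟩, by simp⟩
      · exact ⟨(5,13,21), by simp, ⟨⟨by simpa using hp, by simpa using h8⟩, by simpa using h16⟩, by simp⟩
      · exact ⟨(7,15,23), by simp, ⟨⟨by simpa using hp, by simpa using h8⟩, by simpa using h16⟩, by simp⟩
    · have : p = 9 ∨ p = 11 ∨ p = 13 ∨ p = 15 := by omega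
      rcases this with rfl|rfl|rfl|rfl
      · exact ⟨(1,9,17), by simp, ⟨⟨by simpa using hm8, by simpa using hp⟩, by simpa using hp8⟩, by simp⟩
      · exact ⟨(3,11,19), by simp, ⟨⟨by simpa using hm8, by simpa using hp⟩, by simpa using hp8⟩, by simp⟩
      · exact ⟨(5,13,21), by simp, ⟨⟨by simpa using hm8, by simpa using hp⟩, by simpa using hp8⟩, by simp⟩
      · exact ⟨(7,15,23), by simp, ⟨⟨by simpa using hm8, by simpa using hp⟩, by simpa using hp8⟩, by simp⟩
    · have : p = 17 ∨ p = 19 ∨ p = 21 ∨ p = 23 := by omega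
      rcases this with rfl|rfl|rfl|rfl
      · exact ⟨(1,9,17), by simp, ⟨⟨by simpa using hm16, by simpa using hm8⟩, by simpa using hp⟩, by simp⟩
      · exact ⟨(3,11,19), by simp, ⟨⟨by simpa using hm16, by simpa using hm8⟩, by simpa using hp⟩, by simp⟩
      · exact ⟨(5,13,21), by simp, ⟨⟨by simpa using hm16, by simpa using hm8⟩, by simpa using hp⟩, by simp⟩
      · exact ⟨(7,15,23), by simp, ⟨⟨by simpa using hm16, by simpa using hm8⟩, by simpa using hp⟩, by simp⟩

theorem ring_char_even (enemy : List Int) (p : Int) (hp : p ∈ enemy)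
    (heven : PySem.Int.mod p 2 = 0) :
    (∃ l ∈ ringLinesOf (PySem.Int.floordiv p 8),
        fullLine (PySem.Set.ofList enemy) l = true ∧ (p = l.1 ∨ p = l.2.1 ∨ p = l.2.2)) ↔
      ((PySem.Int.mod (p+2) 8 + 8 * PySem.Int.floordiv p 8 ∈ enemy ∧
        PySem.Int.mod (p+1) 8 + 8 * PySem.Int.floordiv p 8 ∈ enemy) ∨
       (PySem.Int.mod (p-2) 8 + 8 * PySem.Int.floordiv p 8 ∈ enemy ∧
        PySem.Int.mod (p-1) 8 + 8 * PySem.Int.floordiv p 8 ∈ enemy)) := by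
  rw [PySem.Int.mod_eq_emod_of_pos (by norm_num : (0:Int) < 2)] at heven
  simp only [PySem.Int.mod_eq_emod_of_pos (by norm_num : (0:Int) < 8),
    PySem.Int.floordiv_eq_ediv_of_pos (by norm_num : (0:Int) < 8)]
  simp only [ringLinesOf, List.mem_cons, List.not_mem_nil, or_false, fullLine,
    PySem.Set.contains_iff, PySem.Set.mem_ofList, Bool.and_eq_true]
  have hb : 0 ≤ p % 8 ∧ p % 8 < 8 := ⟨Int.emod_nonneg p (by norm_num), Int.emod_lt_of_pos p (by norm_num)⟩
  have h8 : p % 8 = 0 ∨ p % 8 = 2 ∨ p % 8 = 4 ∨ p % 8 = 6 := by omega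
  rcases h8 with h|h|h|h
  · have e1 : (p+2) % 8 + 8 * (p / 8) = 8*(p/8)+2 := by omega
    have e2 : (p+1) % 8 + 8 * (p / 8) = 8*(p/8)+1 := by omega
    have e3 : (p-2) % 8 + 8 * (p / 8) = 8*(p/8)+6 := by omega
    have e4 : (p-1) % 8 + 8 * (p / 8) = 8*(p/8)+7 := by omega
    rw [e1, e2, e3, e4]
    have hpv : (8*(p/8) : Int) ∈ enemy := by
      have hh : p = 8*(p/8) := by omega
      exact hh ▸ hp
    constructor
    · rintro ⟨l, (rfl|rfl|rfl|rfl), hf, hx⟩ <;> dsimp only at hf hx <;>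
        obtain ⟨⟨h1, h2⟩, h3⟩ := hf <;>
        rcases hx with hx|hx|hx <;> first | (exfalso; omega) | tauto
    · rintro (⟨ha, hb'⟩|⟨ha, hb'⟩)
      · exact ⟨_, Or.inl rfl, ⟨⟨hpv, hb'⟩, ha⟩, Or.inl (by omega : p = 8*(p/8))⟩
      · exact ⟨_, Or.inr (Or.inr (Or.inr rfl)), ⟨⟨ha, hb'⟩, hpv⟩, Or.inr (Or.inr (by omega : p = 8*(p/8)))⟩
  · have e1 : (p+2) % 8 + 8 * (p / 8) = 8*(p/8)+4 := by omega
    have e2 : (p+1) % 8 + 8 * (p / 8) = 8*(p/8)+3 := by omega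
    have e3 : (p-2) % 8 + 8 * (p / 8) = 8*(p/8) := by omega
    have e4 : (p-1) % 8 + 8 * (p / 8) = 8*(p/8)+1 := by omega
    rw [e1, e2, e3, e4]
    have hpv : (8*(p/8)+2 : Int) ∈ enemy := by
      have hh : p = 8*(p/8)+2 := by omega
      exact hh ▸ hp
    constructor
    · rintro ⟨l, (rfl|rfl|rfl|rfl), hf, hx⟩ <;> dsimp only at hf hx <;>
        obtain ⟨⟨h1, h2⟩, h3⟩ := hf <;>
        rcases hx with hx|hx|hx <;> first | (exfalso; omega) | tauto
    · rintro (⟨ha, hb'⟩|⟨ha, hb'⟩)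
      · exact ⟨_, Or.inr (Or.inl rfl), ⟨⟨hpv, hb'⟩, ha⟩, Or.inl (by omega : p = 8*(p/8)+2)⟩
      · exact ⟨_, Or.inl rfl, ⟨⟨ha, hb'⟩, hpv⟩, Or.inr (Or.inr (by omega : p = 8*(p/8)+2))⟩
  · have e1 : (p+2) % 8 + 8 * (p / 8) = 8*(p/8)+6 := by omega
    have e2 : (p+1) % 8 + 8 * (p / 8) = 8*(p/8)+5 := by omega
    have e3 : (p-2) % 8 + 8 * (p / 8) = 8*(p/8)+2 := by omega
    have e4 : (p-1) % 8 + 8 * (p / 8) = 8*(p/8)+3 := by omega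
    rw [e1, e2, e3, e4]
    have hpv : (8*(p/8)+4 : Int) ∈ enemy := by
      have hh : p = 8*(p/8)+4 := by omega
      exact hh ▸ hp
    constructor
    · rintro ⟨l, (rfl|rfl|rfl|rfl), hf, hx⟩ <;> dsimp only at hf hx <;>
        obtain ⟨⟨h1, h2⟩, h3⟩ := hf <;>
        rcases hx with hx|hx|hx <;> first | (exfalso; omega) | tauto
    · rintro (⟨ha, hb'⟩|⟨ha, hb'⟩)
      · exact ⟨_, Or.inr (Or.inr (Or.inl rfl)), ⟨⟨hpv, hb'⟩, ha⟩, Or.inl (by omega : p = 8*(p/8)+4)⟩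
      · exact ⟨_, Or.inr (Or.inl rfl), ⟨⟨ha, hb'⟩, hpv⟩, Or.inr (Or.inr (by omega : p = 8*(p/8)+4))⟩
  · have e1 : (p+2) % 8 + 8 * (p / 8) = 8*(p/8) := by omega
    have e2 : (p+1) % 8 + 8 * (p / 8) = 8*(p/8)+7 := by omega
    have e3 : (p-2) % 8 + 8 * (p / 8) = 8*(p/8)+4 := by omega
    have e4 : (p-1) % 8 + 8 * (p / 8) = 8*(p/8)+5 := by omega
    rw [e1, e2, e3, e4]
    have hpv : (8*(p/8)+6 : Int) ∈ enemy := by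
      have hh : p = 8*(p/8)+6 := by omega
      exact hh ▸ hp
    constructor
    · rintro ⟨l, (rfl|rfl|rfl|rfl), hf, hx⟩ <;> dsimp only at hf hx <;>
        obtain ⟨⟨h1, h2⟩, h3⟩ := hf <;>
        rcases hx with hx|hx|hx <;> first | (exfalso; omega) | tauto
    · rintro (⟨ha, hb'⟩|⟨ha, hb'⟩)
      · exact ⟨_, Or.inr (Or.inr (Or.inr rfl)), ⟨⟨hpv, hb'⟩, ha⟩, Or.inl (by omega : p = 8*(p/8)+6)⟩
      · exact ⟨_, Or.inr (Or.inr (Or.inl rfl)), ⟨⟨ha, hb'⟩, hpv⟩, Or.inr (Or.inr (by omega : p = 8*(p/8)+6))⟩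

theorem ring_char_odd (enemy : List Int) (p : Int) (hp : p ∈ enemy)
    (hodd : ¬ PySem.Int.mod p 2 = 0) :
    (∃ l ∈ ringLinesOf (PySem.Int.floordiv p 8),
        fullLine (PySem.Set.ofList enemy) l = true ∧ (p = l.1 ∨ p = l.2.1 ∨ p = l.2.2)) ↔
      (PySem.Int.mod (p+1) 8 + 8 * PySem.Int.floordiv p 8 ∈ enemy ∧
       PySem.Int.mod (p-1) 8 + 8 * PySem.Int.floordiv p 8 ∈ enemy) := by
  rw [PySem.Int.mod_eq_emod_of_pos (by norm_num : (0:Int) < 2)] at hodd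
  simp only [PySem.Int.mod_eq_emod_of_pos (by norm_num : (0:Int) < 8),
    PySem.Int.floordiv_eq_ediv_of_pos (by norm_num : (0:Int) < 8)]
  simp only [ringLinesOf, List.mem_cons, List.not_mem_nil, or_false, fullLine,
    PySem.Set.contains_iff, PySem.Set.mem_ofList, Bool.and_eq_true]
  have hb : 0 ≤ p % 8 ∧ p % 8 < 8 := ⟨Int.emod_nonneg p (by norm_num), Int.emod_lt_of_pos p (by norm_num)⟩
  have h8 : p % 8 = 1 ∨ p % 8 = 3 ∨ p % 8 = 5 ∨ p % 8 = 7 := by omega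
  rcases h8 with h|h|h|h
  · have e1 : (p+1) % 8 + 8 * (p / 8) = 8*(p/8)+2 := by omega
    have e2 : (p-1) % 8 + 8 * (p / 8) = 8*(p/8) := by omega
    rw [e1, e2]
    have hpv : (8*(p/8)+1 : Int) ∈ enemy := by
      have hh : p = 8*(p/8)+1 := by omega
      exact hh ▸ hp
    constructor
    · rintro ⟨l, (rfl|rfl|rfl|rfl), hf, hx⟩ <;> dsimp only at hf hx <;>
        obtain ⟨⟨h1, h2⟩, h3⟩ := hf <;>
        rcases hx with hx|hx|hx <;> first | (exfalso; omega) | tauto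
    · rintro ⟨ha, hb'⟩
      exact ⟨_, Or.inl rfl, ⟨⟨hb', hpv⟩, ha⟩, Or.inr (Or.inl (by omega : p = 8*(p/8)+1))⟩
  · have e1 : (p+1) % 8 + 8 * (p / 8) = 8*(p/8)+4 := by omega
    have e2 : (p-1) % 8 + 8 * (p / 8) = 8*(p/8)+2 := by omega
    rw [e1, e2]
    have hpv : (8*(p/8)+3 : Int) ∈ enemy := by
      have hh : p = 8*(p/8)+3 := by omega
      exact hh ▸ hp
    constructor
    · rintro ⟨l, (rfl|rfl|rfl|rfl), hf, hx⟩ <;> dsimp only at hf hx <;>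
        obtain ⟨⟨h1, h2⟩, h3⟩ := hf <;>
        rcases hx with hx|hx|hx <;> first | (exfalso; omega) | tauto
    · rintro ⟨ha, hb'⟩
      exact ⟨_, Or.inr (Or.inl rfl), ⟨⟨hb', hpv⟩, ha⟩, Or.inr (Or.inl (by omega : p = 8*(p/8)+3))⟩
  · have e1 : (p+1) % 8 + 8 * (p / 8) = 8*(p/8)+6 := by omega
    have e2 : (p-1) % 8 + 8 * (p / 8) = 8*(p/8)+4 := by omega
    rw [e1, e2]
    have hpv : (8*(p/8)+5 : Int) ∈ enemy := by
      have hh : p = 8*(p/8)+5 := by omega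
      exact hh ▸ hp
    constructor
    · rintro ⟨l, (rfl|rfl|rfl|rfl), hf, hx⟩ <;> dsimp only at hf hx <;>
        obtain ⟨⟨h1, h2⟩, h3⟩ := hf <;>
        rcases hx with hx|hx|hx <;> first | (exfalso; omega) | tauto
    · rintro ⟨ha, hb'⟩
      exact ⟨_, Or.inr (Or.inr (Or.inl rfl)), ⟨⟨hb', hpv⟩, ha⟩, Or.inr (Or.inl (by omega : p = 8*(p/8)+5))⟩
  · have e1 : (p+1) % 8 + 8 * (p / 8) = 8*(p/8) := by omega
    have e2 : (p-1) % 8 + 8 * (p / 8) = 8*(p/8)+6 := by omega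
    rw [e1, e2]
    have hpv : (8*(p/8)+7 : Int) ∈ enemy := by
      have hh : p = 8*(p/8)+7 := by omega
      exact hh ▸ hp
    constructor
    · rintro ⟨l, (rfl|rfl|rfl|rfl), hf, hx⟩ <;> dsimp only at hf hx <;>
        obtain ⟨⟨h1, h2⟩, h3⟩ := hf <;>
        rcases hx with hx|hx|hx <;> first | (exfalso; omega) | tauto
    · rintro ⟨ha, hb'⟩
      exact ⟨_, Or.inr (Or.inr (Or.inr rfl)), ⟨⟨hb', hpv⟩, ha⟩, Or.inr (Or.inl (by omega : p = 8*(p/8)+7))⟩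

theorem mill_eq (enemy : List Int) (p : Int) (hp : p ∈ enemy) :
    (if PySem.Int.mod p 2 == 0 then comprobarPar p enemy else comprobarImpar p enemy)
      = PySem.Set.contains (milledOf enemy) p := by
  rw [Bool.eq_iff_iff, PySem.Set.contains_iff, milled_char enemy p hp]
  by_cases hm : PySem.Int.mod p 2 = 0
  · have hs : ¬ (∃ l ∈ spokeLines, fullLine (PySem.Set.ofList enemy) l = true ∧
        (p = l.1 ∨ p = l.2.1 ∨ p = l.2.2)) := by
      rintro ⟨l, hl, hf, hx⟩
      simp only [spokeLines, List.mem_cons, List.not_mem_nil, or_false] at hl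
      rw [PySem.Int.mod_eq_emod_of_pos (by norm_num : (0:Int) < 2)] at hm
      rcases hl with rfl|rfl|rfl|rfl <;> rcases hx with hx|hx|hx <;> dsimp only at hx <;> omega
    rw [if_pos (by simpa using hm)]
    rw [ring_char_even enemy p hp hm]
    simp only [comprobarPar]
    constructor
    · intro hC
      left
      simp only [Bool.if_true_left, Bool.or_eq_true, Bool.and_eq_true, List.contains_iff_mem,
        decide_eq_true_eq, Bool.false_eq_true, or_false] at hC
      tauto
    · intro hC
      rcases hC with hC | hC
      · simp only [Bool.if_true_left, Bool.or_eq_true, Bool.and_eq_true, List.contains_iff_mem,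
          decide_eq_true_eq, Bool.false_eq_true, or_false]
        tauto
      · exact absurd hC hs
  · rw [if_neg (by simpa using hm)]
    rw [ring_char_odd enemy p hp hm, spoke_char enemy p hp hm]
    simp only [comprobarImpar]
    simp only [Bool.if_true_left, Bool.or_eq_true, Bool.and_eq_true, List.contains_iff_mem,
      beq_iff_eq, decide_eq_true_eq, Bool.false_eq_true, or_false]

-- the append loop of A is the pair of filters of B
theorem foldl_partition (mol : Int → Bool) (fase : Int) (l : List Int) (p q : List Int) :
    l.foldl (fun (acc : List Int × List Int) ficha =>
      if !mol ficha then (acc.1 ++ [ficha], acc.2)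
      else if fase == 2 then (acc.1, acc.2 ++ [ficha])
      else acc) (p, q)
    = (p ++ l.filter (fun f => !mol f),
       q ++ if fase == 2 then l.filter mol else []) := by
  induction l generalizing p q with
  | nil => simp
  | cons x xs ih =>
    rw [List.foldl_cons]
    by_cases hx : mol x
    · by_cases hf : (fase == 2) = true
      · rw [if_neg (by simp [hx]), if_pos hf, ih]
        simp [hx, hf]
      · rw [if_neg (by simp [hx]), if_neg hf, ih]
        simp [hx, hf]
    · rw [if_pos (by simp [hx]), ih]
      simp [hx]

-- ===== VERDICT (by name: the statement is the Claim_ definition above) =====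
theorem casillaEnemigaSucesores_spec : Claim_equal_casillaEnemigaSucesores := by
  intro gamers turn fase _ hpre
  unfold Spec_casillaEnemigaSucesores
  unfold Pre_casillaEnemigaSucesores at hpre
  obtain ⟨enemy, h⟩ : ∃ e, PySem.List.pyGet? gamers (PySem.Int.mod (turn - 1) 2) = some e := by
    rcases he : PySem.List.pyGet? gamers (PySem.Int.mod (turn - 1) 2) with _ | e
    · exact absurd hpre (((PySem.List.pyGet?_eq_none_iff _ _).mp he))
    · exact ⟨e, rfl⟩
  unfold casillaEnemigaSucesores casillaEnemigaSucesores_alt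
  rw [h]
  simp only [foldl_partition (fun f => comprobarMolino gamers (PySem.Int.mod (turn - 1) 2) f) fase enemy [] []]
  have hc : ∀ q ∈ enemy, comprobarMolino gamers (PySem.Int.mod (turn - 1) 2) q
      = PySem.Set.contains (milledOf enemy) q := by
    intro q hq
    unfold comprobarMolino
    rw [h, ← mill_eq enemy q hq]
    split_ifs <;> simp_all
  have e1 : enemy.filter (fun f => !comprobarMolino gamers (PySem.Int.mod (turn - 1) 2) f)
      = enemy.filter (fun q => !(PySem.Set.contains (milledOf enemy) q)) :=
    List.filter_congr (fun x hx => by simpa using hc x hx)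
  have e2 : enemy.filter (fun f => comprobarMolino gamers (PySem.Int.mod (turn - 1) 2) f)
      = enemy.filter (fun q => PySem.Set.contains (milledOf enemy) q) :=
    List.filter_congr (fun x hx => by simpa using hc x hx)
  simp only [List.nil_append]
  rw [e1]
  by_cases hf : (fase == 2) = true
  · rw [if_pos hf, if_pos hf, e2]
    rfl
  · rw [if_neg hf, if_neg hf]
    rfl
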